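-- pv_equiv track=rewrite | github.com/ezekaj/elo-agi | neuro/modules/model/neuro_agent.py | _plan_actions
-- ===== SOURCE A (Python) =====
-- from typing import Dict, List, Optional, Any, Tuple
--
-- def _plan_actions(query: str) -> List[str]:
--     """Determine what actions/tools are needed."""
--     query_lower = query.lower()
--     plan = []
--
--     # Check if this is a project/directory analysis request
--     is_project_analysis = any(w in query_lower for w in ['analyze', 'project', 'about', 'what is'])
--     has_path = '/' in query or '~' in query
--
--     if is_project_analysis and has_path:
--         # For project analysis: list files then read README
--         plan.append("list_files")
--         plan.append("read_readme")
--         return plan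
--
--     # Detect intent and plan accordingly
--     if any(w in query_lower for w in ['search', 'find', 'look up']):
--         plan.append("web_search")
--
--     if any(w in query_lower for w in ['what is', 'who is', 'explain']) and not has_path:
--         plan.append("web_search")
--
--     if any(w in query_lower for w in ['github', 'repo', 'repository']):
--         plan.append("github_lookup")
--
--     if any(w in query_lower for w in ['file', 'read', 'open', 'show', 'content']):
--         plan.append("file_read")
--
--     if any(w in query_lower for w in ['list', 'directory', 'folder']):
--         plan.append("list_files")
--
--     if any(w in query_lower for w in ['run', 'execute', 'command', 'python', 'calculate']):
--         plan.append("execute_code")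
--
--     if any(w in query_lower for w in ['browse', 'website', 'webpage', 'url']):
--         plan.append("browse_web")
--
--     if any(w in query_lower for w in ['remember', 'store', 'save', 'note']):
--         plan.append("remember")
--
--     if any(w in query_lower for w in ['recall', 'what did', 'retrieve']):
--         plan.append("recall")
--
--     # Default: just respond
--     if not plan:
--         plan.append("respond")
--
--     return plan
-- ===== SOURCE B (Python) =====
-- from typing import List
--
-- # Inverted index: one flat scan over (keyword, rule-id) pairs collects the SET of
-- # fired rules; tools are then emitted in rule-id order (= the original rule order).
-- _KEYWORD_INDEX = [
--     ('search', 0), ('find', 0), ('look up', 0),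
--     ('what is', 1), ('who is', 1), ('explain', 1),
--     ('github', 2), ('repo', 2), ('repository', 2),
--     ('file', 3), ('read', 3), ('open', 3), ('show', 3), ('content', 3),
--     ('list', 4), ('directory', 4), ('folder', 4),
--     ('run', 5), ('execute', 5), ('command', 5), ('python', 5), ('calculate', 5),
--     ('browse', 6), ('website', 6), ('webpage', 6), ('url', 6),
--     ('remember', 7), ('store', 7), ('save', 7), ('note', 7),
--     ('recall', 8), ('what did', 8), ('retrieve', 8),
-- ]
-- _TOOLS = ['web_search', 'web_search', 'github_lookup', 'file_read', 'list_files',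
--           'execute_code', 'browse_web', 'remember', 'recall']
--
--
-- def _plan_actions(query: str) -> List[str]:
--     """Determine what actions/tools are needed."""
--     query_lower = query.lower()
--     has_path = '/' in query or '~' in query
--
--     if has_path and any(w in query_lower for w in ('analyze', 'project', 'about', 'what is')):
--         return ["list_files", "read_readme"]
--
--     fired = {rid for kw, rid in _KEYWORD_INDEX if kw in query_lower}
--     if has_path:
--         fired.discard(1)  # the 'what is'/'who is'/'explain' rule only applies without a path
--     plan = [_TOOLS[rid] for rid in sorted(fired)]
--     return plan or ["respond"]
-- ===== Notes on version B (the rewrite author's own statement) =====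
-- stated objective: alternative
-- what changed: The nine per-rule if/any blocks are replaced by an inverted keyword-to-rule-id index scanned in one flat pass, collecting a set of fired rule ids from which the tool names are emitted in sorted rule-id order (with the path-sensitive rule dropped from the set when a path is present).
import Mathlib
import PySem

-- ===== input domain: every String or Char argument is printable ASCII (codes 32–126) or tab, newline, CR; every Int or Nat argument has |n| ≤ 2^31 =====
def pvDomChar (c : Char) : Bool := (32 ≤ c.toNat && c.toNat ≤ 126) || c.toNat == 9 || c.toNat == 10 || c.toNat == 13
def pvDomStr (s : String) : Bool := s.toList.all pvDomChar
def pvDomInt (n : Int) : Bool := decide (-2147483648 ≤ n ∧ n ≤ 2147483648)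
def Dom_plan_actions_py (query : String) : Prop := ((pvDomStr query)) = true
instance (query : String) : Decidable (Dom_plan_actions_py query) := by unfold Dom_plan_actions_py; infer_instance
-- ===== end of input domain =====

-- B replaces A's per-rule if/any chain by an inverted keyword→rule-id index scanned once,
-- collecting a set of fired rule ids whose tools are emitted in sorted rule-id order (objective: alternative).

-- shared helper: any(w in query_lower for w in ws)
def pvHit (ql : String) (ws : List String) : Bool := ws.any fun w => PySem.Str.isIn w ql

-- ===== PORT A =====
def plan_actions_py (query : String) : List String :=
  let ql := PySem.Str.lower query
  let hasPath := PySem.Str.isIn "/" query || PySem.Str.isIn "~" query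
  if pvHit ql ["analyze", "project", "about", "what is"] && hasPath then
    ([] : List String) ++ ["list_files"] ++ ["read_readme"]
  else
    let plan : List String := []
    let plan := if pvHit ql ["search", "find", "look up"] then plan ++ ["web_search"] else plan
    let plan := if pvHit ql ["what is", "who is", "explain"] && !hasPath then plan ++ ["web_search"] else plan
    let plan := if pvHit ql ["github", "repo", "repository"] then plan ++ ["github_lookup"] else plan
    let plan := if pvHit ql ["file", "read", "open", "show", "content"] then plan ++ ["file_read"] else plan
    let plan := if pvHit ql ["list", "directory", "folder"] then plan ++ ["list_files"] else plan
    let plan := if pvHit ql ["run", "execute", "command", "python", "calculate"] then plan ++ ["execute_code"] else plan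
    let plan := if pvHit ql ["browse", "website", "webpage", "url"] then plan ++ ["browse_web"] else plan
    let plan := if pvHit ql ["remember", "store", "save", "note"] then plan ++ ["remember"] else plan
    let plan := if pvHit ql ["recall", "what did", "retrieve"] then plan ++ ["recall"] else plan
    if plan.isEmpty then plan ++ ["respond"] else plan

-- ===== PORT B =====
-- B's flat inverted index (keyword, rule id) and the tool of each rule id
def pvKwIndex : List (String × Nat) :=
  [ ("search", 0), ("find", 0), ("look up", 0),
    ("what is", 1), ("who is", 1), ("explain", 1),
    ("github", 2), ("repo", 2), ("repository", 2),
    ("file", 3), ("read", 3), ("open", 3), ("show", 3), ("content", 3),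
    ("list", 4), ("directory", 4), ("folder", 4),
    ("run", 5), ("execute", 5), ("command", 5), ("python", 5), ("calculate", 5),
    ("browse", 6), ("website", 6), ("webpage", 6), ("url", 6),
    ("remember", 7), ("store", 7), ("save", 7), ("note", 7),
    ("recall", 8), ("what did", 8), ("retrieve", 8) ]

def pvTools : List String :=
  ["web_search", "web_search", "github_lookup", "file_read", "list_files",
   "execute_code", "browse_web", "remember", "recall"]

def plan_actions_py_alt (query : String) : List String :=
  let ql := PySem.Str.lower query
  let hasPath := PySem.Str.isIn "/" query || PySem.Str.isIn "~" query
  if hasPath && pvHit ql ["analyze", "project", "about", "what is"] then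
    ["list_files", "read_readme"]
  else
    let fired : PySem.Set Nat :=
      PySem.Set.ofList ((pvKwIndex.filter fun p => PySem.Str.isIn p.1 ql).map Prod.snd)
    let fired := if hasPath then PySem.Set.discard fired 1 else fired
    let plan := (PySem.List.sorted fired (fun x => x)).map fun rid => pvTools.getD rid ""
    if plan.isEmpty then ["respond"] else plan

-- ===== PRECONDITION & SPEC =====
def Spec_plan_actions_py (query : String) (out : List String) : Prop := out = plan_actions_py_alt query
instance (query : String) (out : List String) : Decidable (Spec_plan_actions_py query out) := by unfold Spec_plan_actions_py; infer_instance

-- ===== CLAIM (what is proved, stated in full; the proofs are below) =====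
def Claim_equal_plan_actions_py : Prop := ∀ (query : String), Dom_plan_actions_py query → Spec_plan_actions_py query (plan_actions_py query)

-- ===== LEMMAS AND PROOFS =====

lemma pv_m0 (ql : String) :
    decide (0 ∈ (pvKwIndex.filter fun p => PySem.Str.isIn p.1 ql).map Prod.snd)
      = pvHit ql ["search", "find", "look up"] := by
  rw [Bool.eq_iff_iff]
  simp [pvHit, pvKwIndex, List.mem_filter]

lemma pv_sorted_fired (ql : String) (hp : Bool) :
    PySem.List.sorted
      (if hp then
        PySem.Set.discard (PySem.Set.ofList ((pvKwIndex.filter fun p => PySem.Str.isIn p.1 ql).map Prod.snd)) 1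
       else
        PySem.Set.ofList ((pvKwIndex.filter fun p => PySem.Str.isIn p.1 ql).map Prod.snd)) (fun x => x)
    = (List.range 9).filter
        (fun i => decide (i ∈ (pvKwIndex.filter fun p => PySem.Str.isIn p.1 ql).map Prod.snd) && (!hp || !(i == 1))) := by
  apply PySem.List.sorted_eq_of_perm_of_pairwise_lt
  · apply (List.perm_ext_iff_of_nodup ?_ ?_).mpr
    · intro a
      cases hp
      · simp [List.mem_filter, List.mem_range, PySem.Set.mem_ofList]
        intro x hx _
        fin_cases hx <;> decide
      · simp [PySem.Set.discard, List.mem_filter, List.mem_range, PySem.Set.mem_ofList]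
        intro x hx _ _
        fin_cases hx <;> decide
    · exact List.nodup_range.filter _
    · cases hp
      · exact PySem.Set.nodup_ofList _
      · exact (PySem.Set.nodup_ofList _).filter _
  · exact List.Pairwise.sublist List.filter_sublist List.pairwise_lt_range

lemma pv_m1 (ql : String) :
    decide (1 ∈ (pvKwIndex.filter fun p => PySem.Str.isIn p.1 ql).map Prod.snd)
      = pvHit ql ["what is", "who is", "explain"] := by
  rw [Bool.eq_iff_iff]
  simp [pvHit, pvKwIndex, List.mem_filter]

lemma pv_m2 (ql : String) :
    decide (2 ∈ (pvKwIndex.filter fun p => PySem.Str.isIn p.1 ql).map Prod.snd)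
      = pvHit ql ["github", "repo", "repository"] := by
  rw [Bool.eq_iff_iff]
  simp [pvHit, pvKwIndex, List.mem_filter]

lemma pv_m3 (ql : String) :
    decide (3 ∈ (pvKwIndex.filter fun p => PySem.Str.isIn p.1 ql).map Prod.snd)
      = pvHit ql ["file", "read", "open", "show", "content"] := by
  rw [Bool.eq_iff_iff]
  simp [pvHit, pvKwIndex, List.mem_filter]

lemma pv_m4 (ql : String) :
    decide (4 ∈ (pvKwIndex.filter fun p => PySem.Str.isIn p.1 ql).map Prod.snd)
      = pvHit ql ["list", "directory", "folder"] := by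
  rw [Bool.eq_iff_iff]
  simp [pvHit, pvKwIndex, List.mem_filter]

lemma pv_m5 (ql : String) :
    decide (5 ∈ (pvKwIndex.filter fun p => PySem.Str.isIn p.1 ql).map Prod.snd)
      = pvHit ql ["run", "execute", "command", "python", "calculate"] := by
  rw [Bool.eq_iff_iff]
  simp [pvHit, pvKwIndex, List.mem_filter]

lemma pv_m6 (ql : String) :
    decide (6 ∈ (pvKwIndex.filter fun p => PySem.Str.isIn p.1 ql).map Prod.snd)
      = pvHit ql ["browse", "website", "webpage", "url"] := by
  rw [Bool.eq_iff_iff]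
  simp [pvHit, pvKwIndex, List.mem_filter]

lemma pv_m7 (ql : String) :
    decide (7 ∈ (pvKwIndex.filter fun p => PySem.Str.isIn p.1 ql).map Prod.snd)
      = pvHit ql ["remember", "store", "save", "note"] := by
  rw [Bool.eq_iff_iff]
  simp [pvHit, pvKwIndex, List.mem_filter]

lemma pv_m8 (ql : String) :
    decide (8 ∈ (pvKwIndex.filter fun p => PySem.Str.isIn p.1 ql).map Prod.snd)
      = pvHit ql ["recall", "what did", "retrieve"] := by
  rw [Bool.eq_iff_iff]
  simp [pvHit, pvKwIndex, List.mem_filter]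

-- ===== VERDICT (by name: the statement is the Claim_ definition above) =====
set_option maxHeartbeats 2000000 in
theorem plan_actions_py_spec : Claim_equal_plan_actions_py := by
  intro q _
  unfold Spec_plan_actions_py plan_actions_py plan_actions_py_alt
  simp only [pv_sorted_fired]
  rw [show (List.range 9) = [0,1,2,3,4,5,6,7,8] from rfl]
  simp only [List.filter_cons, List.filter_nil, pv_m0, pv_m1, pv_m2, pv_m3, pv_m4, pv_m5, pv_m6, pv_m7, pv_m8]
  generalize (PySem.Str.isIn "/" q || PySem.Str.isIn "~" q) = hp
  generalize pvHit (PySem.Str.lower q) ["analyze", "project", "about", "what is"] = cp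
  generalize pvHit (PySem.Str.lower q) ["search", "find", "look up"] = c0
  generalize pvHit (PySem.Str.lower q) ["what is", "who is", "explain"] = c1
  generalize pvHit (PySem.Str.lower q) ["github", "repo", "repository"] = c2
  generalize pvHit (PySem.Str.lower q) ["file", "read", "open", "show", "content"] = c3
  generalize pvHit (PySem.Str.lower q) ["list", "directory", "folder"] = c4
  generalize pvHit (PySem.Str.lower q) ["run", "execute", "command", "python", "calculate"] = c5
  generalize pvHit (PySem.Str.lower q) ["browse", "website", "webpage", "url"] = c6
  generalize pvHit (PySem.Str.lower q) ["remember", "store", "save", "note"] = c7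
  generalize pvHit (PySem.Str.lower q) ["recall", "what did", "retrieve"] = c8
  revert hp cp c0 c1 c2 c3 c4 c5 c6 c7 c8
  decide
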